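-- pv_equiv track=rewrite | github.com/sguduguntla/bldg_point_clustering | bldg_point_clustering/tokenizer/tokenizers.py | arka_tokenizer
-- ===== SOURCE A (Python) =====
-- def arka_tokenizer(point):
--     """ Tokenizes a string into words based on whenever the character changes from
--     the alphabetic character, to a numberic character, or to any other special character
--     that is not alphanumeric.
--
--     :param point: String to be tokenized
--     :return: Array of tokens that string is broken up into (array of strings)
--
--     """
--
--     consecutive = dict.fromkeys(["alpha", "numeric", "special char"], False)
--     tokens = []
--     s = ""
--
--     #allowed = ["-", "_"]
--
--     for char in point:
--         if char.isalpha():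
--             if not consecutive["alpha"]:
--                 consecutive["alpha"] = True
--                 consecutive["numeric"] = False
--                 consecutive["special char"] = False
--                 tokens.append(s)
--                 s = ""
--         elif char.isdigit():
--             if not consecutive["numeric"]:
--                 consecutive["alpha"] = False
--                 consecutive["numeric"] = True
--                 consecutive["special char"] = False
--                 tokens.append(s)
--                 s = ""
--         else:
--             if not consecutive["special char"]:
--                 consecutive["alpha"] = False
--                 consecutive["numeric"] = False
--                 consecutive["special char"] = True
--                 tokens.append(s)
--                 s = ""
--
--         s += char
--
--     return tokens[1:]
-- ===== SOURCE B (Python) =====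
-- def arka_tokenizer(point):
--     def cls(c):
--         if c.isalpha():
--             return 0
--         if c.isdigit():
--             return 1
--         return 2
--     n = len(point)
--     tokens = []
--     start = 0
--     while start < n:
--         i = start + 1
--         while i < n and cls(point[i]) == cls(point[start]):
--             i += 1
--         if i == n:
--             break
--         tokens.append(point[start:i])
--         start = i
--     return tokens
-- ===== Notes on version B (the rewrite author's own statement) =====
-- stated objective: simpler
-- what changed: Replaces A's per-character three-flag state machine with string accumulator by an outer loop over run start indices that scans each same-class run to its end and slices it out, never emitting the final run.
import Mathlib
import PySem

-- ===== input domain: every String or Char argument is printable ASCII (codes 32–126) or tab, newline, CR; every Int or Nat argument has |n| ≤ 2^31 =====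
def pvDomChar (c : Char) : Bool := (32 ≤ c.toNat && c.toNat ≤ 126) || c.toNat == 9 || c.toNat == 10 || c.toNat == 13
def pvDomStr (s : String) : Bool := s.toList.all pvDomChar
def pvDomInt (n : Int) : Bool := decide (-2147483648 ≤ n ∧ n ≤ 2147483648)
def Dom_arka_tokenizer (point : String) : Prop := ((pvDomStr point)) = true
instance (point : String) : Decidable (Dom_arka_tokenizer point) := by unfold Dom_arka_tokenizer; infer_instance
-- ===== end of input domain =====

-- B replaces A's per-character flag state machine by a loop over runs that slices each
-- same-class run out of the string (objective: simpler). Both drop the final run, as A does.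

-- ===== PORT A =====
-- state = ((alpha, numeric, special) flags, tokens, current token s); chars as List Char,
-- Char.isAlpha / Char.isDigit are exact for Python's isalpha / isdigit on the ASCII domain.
def pvStepA (st : (Bool × Bool × Bool) × List (List Char) × List Char) (c : Char) :
    (Bool × Bool × Bool) × List (List Char) × List Char :=
  let ((a, n, sp), toks, s) := st
  if c.isAlpha then
    if !a then ((true, false, false), toks ++ [s], ([] : List Char) ++ [c])
    else ((a, n, sp), toks, s ++ [c])
  else if c.isDigit then
    if !n then ((false, true, false), toks ++ [s], ([] : List Char) ++ [c])
    else ((a, n, sp), toks, s ++ [c])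
  else
    if !sp then ((false, false, true), toks ++ [s], ([] : List Char) ++ [c])
    else ((a, n, sp), toks, s ++ [c])

def arka_tokenizer (point : String) : List String :=
  let res := point.toList.foldl pvStepA ((false, false, false), ([] : List (List Char)), ([] : List Char))
  -- tokens[1:]
  ((res.2.1).drop 1).map String.mk

-- ===== PORT B =====
-- cls: 0 = alpha, 1 = digit, 2 = special
def pvCls (c : Char) : Nat :=
  if c.isAlpha then 0 else if c.isDigit then 1 else 2

-- the outer while-loop of Source B as recursion on the remaining suffix; the inner while-loop
-- scanning the run is takeWhile/dropWhile of the same predicate, the slice point[start:i] is the run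
def pvAltGo (l : List Char) : List String :=
  match l with
  | [] => []
  | c :: cs =>
      let run := c :: cs.takeWhile (fun d => pvCls d == pvCls c)
      let rest := cs.dropWhile (fun d => pvCls d == pvCls c)
      match rest with
      | [] => []
      | _ :: _ => String.mk run :: pvAltGo rest
termination_by l.length
decreasing_by
  simp only [List.length_cons]
  exact Nat.lt_succ_of_le (List.length_dropWhile_le _ _)

def arka_tokenizer_alt (point : String) : List String := pvAltGo point.toList

-- ===== PRECONDITION & SPEC =====
def Spec_arka_tokenizer (point : String) (out : List String) : Prop := out = arka_tokenizer_alt point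
instance (point : String) (out : List String) : Decidable (Spec_arka_tokenizer point out) := by unfold Spec_arka_tokenizer; infer_instance

-- ===== CLAIM (what is proved, stated in full; the proofs are below) =====
def Claim_equal_arka_tokenizer : Prop := ∀ (point : String), Dom_arka_tokenizer point → Spec_arka_tokenizer point (arka_tokenizer point)

-- ===== LEMMAS AND PROOFS =====

-- reference grouping of a char list into maximal same-class runs
def pvRuns (l : List Char) : List (List Char) :=
  match l with
  | [] => []
  | c :: cs =>
      (c :: cs.takeWhile (fun d => pvCls d == pvCls c)) :: pvRuns (cs.dropWhile (fun d => pvCls d == pvCls c))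
termination_by l.length
decreasing_by
  simp only [List.length_cons]
  exact Nat.lt_succ_of_le (List.length_dropWhile_le _ _)

-- flags corresponding to a previous class (3 = the all-false start state)
def pvFlags (k : Nat) : Bool × Bool × Bool :=
  if k = 0 then (true, false, false)
  else if k = 1 then (false, true, false)
  else if k = 2 then (false, false, true)
  else (false, false, false)

lemma pvCls_lt (c : Char) : pvCls c < 3 := by
  unfold pvCls; split_ifs <;> omega

lemma pvStepA_same (k : Nat) (toks : List (List Char)) (s : List Char) (c : Char)
    (h : pvCls c = k) : pvStepA (pvFlags k, toks, s) c = (pvFlags k, toks, s ++ [c]) := by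
  unfold pvCls at h
  unfold pvStepA pvFlags
  split_ifs at h <;> subst h <;> simp_all

lemma pvStepA_diff (k : Nat) (toks : List (List Char)) (s : List Char) (c : Char)
    (h : pvCls c ≠ k) :
    pvStepA (pvFlags k, toks, s) c = (pvFlags (pvCls c), toks ++ [s], [c]) := by
  unfold pvCls at h ⊢
  unfold pvStepA pvFlags
  split_ifs <;> simp_all

lemma pvChunk (l : List Char) (k : Nat) (toks : List (List Char)) (s : List Char) :
    l.foldl pvStepA (pvFlags k, toks, s) =
      (l.dropWhile (fun d => pvCls d == k)).foldl pvStepA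
        (pvFlags k, toks, s ++ l.takeWhile (fun d => pvCls d == k)) := by
  induction l generalizing s with
  | nil => simp
  | cons c cs ih =>
      by_cases h : pvCls c = k
      · simp only [List.foldl_cons, List.takeWhile_cons, List.dropWhile_cons, h, beq_self_eq_true,
          if_true]
        rw [pvStepA_same k toks s c h, ih]
        simp
      · have hb : (pvCls c == k) = false := by simp [h]
        simp [hb]

lemma pvDropWhile_head {α : Type} (p : α → Bool) (l : List α) (c : α) (cs : List α)
    (h : l.dropWhile p = c :: cs) : p c = false := by
  induction l with
  | nil => simp at h
  | cons a as ih =>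
      by_cases hp : p a
      · exact ih (by simpa [List.dropWhile_cons, hp] using h)
      · simp [hp] at h
        rw [← h.1]
        simpa using hp

lemma pvRuns_cons (c : Char) (cs : List Char) :
    pvRuns (c :: cs) =
      (c :: cs.takeWhile (fun d => pvCls d == pvCls c)) :: pvRuns (cs.dropWhile (fun d => pvCls d == pvCls c)) := by
  rw [pvRuns]

-- main invariant for A's fold: starting with flags for class k ≠ class of the first char,
-- the final token list is toks ++ s :: all runs of l except the last
lemma pvMain : ∀ (n : Nat) (l : List Char), l.length ≤ n → ∀ (k : Nat) (toks : List (List Char)) (s : List Char)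
    (c : Char) (cs : List Char), l = c :: cs → pvCls c ≠ k →
    (l.foldl pvStepA (pvFlags k, toks, s)).2.1 = toks ++ s :: (pvRuns l).dropLast := by
  intro n
  induction n with
  | zero => intro l hl k toks s c cs hcs; subst hcs; simp at hl
  | succ n ih =>
      intro l hl k toks s c cs hcs hk
      subst hcs
      rw [List.foldl_cons, pvStepA_diff k toks s c hk, pvChunk]
      rw [pvRuns_cons]
      rcases hrest : cs.dropWhile (fun d => pvCls d == pvCls c) with _ | ⟨c', cs'⟩
      · -- last run: nothing more appended; dropLast of a singleton is []
        have hruns : pvRuns ([] : List Char) = [] := by rw [pvRuns]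
        simp [hruns]
      · have hc' : pvCls c' ≠ pvCls c := by
          have := pvDropWhile_head (fun d => pvCls d == pvCls c) cs c' cs' hrest
          simpa using this
        have hlen : (c' :: cs').length ≤ n := by
          have h1 : (cs.dropWhile (fun d => pvCls d == pvCls c)).length ≤ cs.length :=
            List.length_dropWhile_le _ _
          rw [hrest] at h1
          simp only [List.length_cons] at hl
          omega
        rw [ih (c' :: cs') hlen (pvCls c) (toks ++ [s]) ([c] ++ cs.takeWhile (fun d => pvCls d == pvCls c)) c' cs' rfl hc']
        have hne : pvRuns (c' :: cs') ≠ [] := by rw [pvRuns]; simp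
        rw [List.dropLast_cons_of_ne_nil hne]
        simp

-- B equals the runs-except-last characterization
lemma pvAlt_eq : ∀ (n : Nat) (l : List Char), l.length ≤ n →
    pvAltGo l = ((pvRuns l).dropLast).map String.mk := by
  intro n
  induction n with
  | zero =>
      intro l hl
      have : l = [] := List.length_eq_zero_iff.mp (Nat.le_zero.mp hl)
      subst this
      rw [pvAltGo, pvRuns]; rfl
  | succ n ih =>
      intro l hl
      match l with
      | [] => rw [pvAltGo, pvRuns]; rfl
      | c :: cs =>
          rw [pvAltGo, pvRuns_cons]
          rcases hrest : cs.dropWhile (fun d => pvCls d == pvCls c) with _ | ⟨c', cs'⟩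
          · have hruns : pvRuns ([] : List Char) = [] := by rw [pvRuns]
            simp [hruns]
          · have hlen : (c' :: cs').length ≤ n := by
              have h1 : (cs.dropWhile (fun d => pvCls d == pvCls c)).length ≤ cs.length :=
                List.length_dropWhile_le _ _
              rw [hrest] at h1
              simp only [List.length_cons] at hl
              omega
            have hne : pvRuns (c' :: cs') ≠ [] := by rw [pvRuns]; simp
            rw [List.dropLast_cons_of_ne_nil hne]
            simp [ih _ hlen]

-- ===== VERDICT (by name: the statement is the Claim_ definition above) =====
theorem arka_tokenizer_spec : Claim_equal_arka_tokenizer := by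
  intro point _
  unfold Spec_arka_tokenizer arka_tokenizer arka_tokenizer_alt
  match hl : point.toList with
  | [] => simp [pvAltGo]
  | c :: cs =>
      have hstart : ((false, false, false) : Bool × Bool × Bool) = pvFlags 3 := by rfl
      have hk : pvCls c ≠ 3 := by have := pvCls_lt c; omega
      simp only [hstart]
      rw [pvMain (c :: cs).length (c :: cs) le_rfl 3 [] [] c cs rfl hk]
      rw [pvAlt_eq (c :: cs).length (c :: cs) le_rfl]
      simp
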